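-- pv_equiv track=rewrite | github.com/rupammandal2003/PYTHON_CODE | delloite_code2.py | count_names_cut
-- ===== SOURCE A (Python) =====
-- def count_names_cut(ranks):
--     cut_count = 1
--     min_rank = float('inf')  # Initialize min_rank as positive infinity
--
--     for rank in ranks:
--         if rank < min_rank:
--             min_rank = rank
--         else:
--             cut_count += 1
--
--     return cut_count
-- ===== SOURCE B (Python) =====
-- def count_names_cut(ranks):
--     # complement view: build the running-minimum sequence, count strict drops
--     # (= strict prefix minima), and subtract from len(ranks) + 1
--     mins = [float('inf')]
--     for r in ranks:
--         mins.append(min(mins[-1], r))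
--     new_mins = sum(1 for prev, cur in zip(mins, mins[1:]) if cur < prev)
--     return len(ranks) + 1 - new_mins
-- ===== Notes on version B (the rewrite author's own statement) =====
-- stated objective: alternative
-- what changed: Inverts A's 'count failures' scan: B builds the running-minimum sequence, counts the strict drops (prefix minima) and returns len(ranks)+1 minus that count.
import Mathlib
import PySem

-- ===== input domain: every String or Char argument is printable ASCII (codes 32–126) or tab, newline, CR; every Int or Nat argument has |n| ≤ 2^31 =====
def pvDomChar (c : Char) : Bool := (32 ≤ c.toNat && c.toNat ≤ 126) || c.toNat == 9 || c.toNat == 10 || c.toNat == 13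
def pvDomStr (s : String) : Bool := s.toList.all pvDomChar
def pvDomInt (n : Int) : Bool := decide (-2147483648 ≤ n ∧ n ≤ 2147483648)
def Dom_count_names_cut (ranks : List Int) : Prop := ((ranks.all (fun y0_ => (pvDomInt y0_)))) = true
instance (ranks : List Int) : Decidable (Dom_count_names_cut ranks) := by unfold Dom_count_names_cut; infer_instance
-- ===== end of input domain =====

-- B inverts A's scan: it builds the running-minimum sequence, counts strict drops
-- (prefix minima) and returns len+1 minus that count; alternative decomposition, same cost.


-- ===== PORT A =====
-- float('inf') is modelled as `none`; any Int compares `<` it, exactly as in Python.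
def count_names_cut (ranks : List Int) : Int :=
  (ranks.foldl
    (fun (st : Int × Option Int) rank =>
      match st.2 with
      | none => (st.1, some rank)          -- rank < inf is always true
      | some m => if rank < m then (st.1, some rank) else (st.1 + 1, some m))
    (1, none)).1

-- ===== PORT B =====
-- running min: `none` = float('inf'); min(inf, r) = r
def pvMin (a : Option Int) (r : Int) : Option Int :=
  match a with
  | none => some r
  | some m => some (min m r)

-- cur < prev, with `none` = inf (cur is never none when compared in B)
def pvLt (cur prev : Option Int) : Bool :=
  match cur, prev with
  | some _, none => true
  | some c, some p => decide (c < p)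
  | none, _ => false

def count_names_cut_alt (ranks : List Int) : Int :=
  let mins := ranks.foldl (fun (acc : List (Option Int)) r => acc ++ [pvMin acc.getLast! r])
                [(none : Option Int)]
  let newMins : Int := (mins.zip mins.tail).foldl
      (fun c p => if pvLt p.2 p.1 then c + 1 else c) 0
  (ranks.length : Int) + 1 - newMins

-- ===== PRECONDITION & SPEC =====
def Spec_count_names_cut (ranks : List Int) (out : Int) : Prop := out = count_names_cut_alt ranks
instance (ranks : List Int) (out : Int) : Decidable (Spec_count_names_cut ranks out) := by unfold Spec_count_names_cut; infer_instance

-- ===== CLAIM (what is proved, stated in full; the proofs are below) =====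
def Claim_equal_count_names_cut : Prop := ∀ (ranks : List Int), Dom_count_names_cut ranks → Spec_count_names_cut ranks (count_names_cut ranks)

-- ===== LEMMAS AND PROOFS =====

-- "this rank is a new running minimum" given current min m
def pvDec (m : Option Int) (r : Int) : Bool :=
  match m with
  | none => true
  | some p => decide (r < p)

-- count of new minima along the scan
def pvD (m : Option Int) : List Int → Int
  | [] => 0
  | r :: rs => (if pvDec m r then 1 else 0) + pvD (pvMin m r) rs

-- the running-min sequence (head = current min before consuming the list)
def pvScan (m : Option Int) : List Int → List (Option Int)
  | [] => [m]
  | r :: rs => m :: pvScan (pvMin m r) rs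

theorem pvScan_head (m : Option Int) (rs : List Int) :
    ∃ t, pvScan m rs = m :: t := by
  cases rs <;> simp [pvScan]

-- the drop test on the scan equals pvDec
theorem pvLt_pvMin (m : Option Int) (r : Int) : pvLt (pvMin m r) m = pvDec m r := by
  cases m with
  | none => rfl
  | some p =>
    by_cases h : r < p <;> simp [pvMin, pvLt, pvDec, h] <;> omega

-- A's fold = c + (len - number of new minima)
theorem a_fold (rs : List Int) : ∀ (c : Int) (m : Option Int),
    (rs.foldl
      (fun (st : Int × Option Int) rank =>
        match st.2 with
        | none => (st.1, some rank)
        | some mm => if rank < mm then (st.1, some rank) else (st.1 + 1, some mm))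
      (c, m)).1 = c + rs.length - pvD m rs := by
  induction rs with
  | nil => intro c m; simp [pvD]
  | cons r rs ih =>
    intro c m
    cases m with
    | none => simp [List.foldl, pvD, pvDec, pvMin, ih]; ring
    | some p =>
      by_cases h : r < p
      · simp [List.foldl, h, pvD, pvDec, pvMin, show min p r = r by omega, ih]; ring
      · simp [List.foldl, h, pvD, pvDec, pvMin, show min p r = p by omega, ih]; ring

-- B's list-building fold is the scan
theorem b_build (rs : List Int) : ∀ (pre : List (Option Int)) (m : Option Int),
    (rs.foldl (fun (acc : List (Option Int)) r => acc ++ [pvMin acc.getLast! r])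
      (pre ++ [m])) = pre ++ pvScan m rs := by
  induction rs with
  | nil => intro pre m; simp [pvScan]
  | cons r rs ih =>
    intro pre m
    have h1 : (pre ++ [m]).getLast! = m := by
      simp [List.getLast!_eq_getLast?_getD]
    have h2 : pre ++ [m] ++ [pvMin m r] = (pre ++ [m]) ++ [pvMin m r] := by simp
    simp only [List.foldl, h1]
    rw [h2, ih (pre ++ [m]) (pvMin m r)]
    simp [pvScan]

-- counting strict drops along the scan
theorem b_count (rs : List Int) : ∀ (m : Option Int) (c : Int),
    (((pvScan m rs).zip (pvScan m rs).tail).foldl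
      (fun c p => if pvLt p.2 p.1 then c + 1 else c) c) = c + pvD m rs := by
  induction rs with
  | nil => intro m c; simp [pvScan, pvD]
  | cons r rs ih =>
    intro m c
    obtain ⟨t, ht⟩ := pvScan_head (pvMin m r) rs
    have ih' := ih (pvMin m r)
    rw [ht] at ih'
    simp only [List.tail_cons] at ih'
    simp only [pvScan, List.tail_cons, ht, List.zip_cons_cons, List.foldl_cons]
    rw [ih', pvLt_pvMin]
    by_cases h : pvDec m r <;> simp [h, pvD] <;> ring

-- ===== VERDICT (by name: the statement is the Claim_ definition above) =====
theorem count_names_cut_spec : Claim_equal_count_names_cut := by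
  intro ranks _
  have hb := b_build ranks [] (none : Option Int)
  simp only [List.nil_append] at hb
  unfold Spec_count_names_cut
  simp only [count_names_cut, count_names_cut_alt]
  rw [hb, b_count ranks none 0, a_fold ranks 1 none]
  ring
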